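-- pv_equiv track=rewrite | github.com/RicardoMartins9321/Universidade_LEI | 1ºAno/FP/Teste prático1 2023/Sufixos-Prefixos.py | longestPrefixRepeated
-- ===== SOURCE A (Python) =====
-- def longestPrefixRepeated(s):
--     i = 0
--     prefixoEscolhido = ""
--
--     while (i+1 <= len(s)-(i+1)):
--         prefixoSelecionado = s[0:(i+1)]
--         if prefixoSelecionado in s[(i+1):]:
--             prefixoEscolhido = prefixoSelecionado
--         i += 1
--     return prefixoEscolhido
-- ===== SOURCE B (Python) =====
-- def longestPrefixRepeated(s):
--     # Binary search on the prefix length: "s[:L] occurs in s[L:]" is monotone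
--     # (downward closed) in L, so the answer is the largest L in [0, len(s)//2]
--     # satisfying it; find it with O(log n) containment tests instead of A's linear scan.
--     lo, hi = 0, len(s) // 2
--     while lo < hi:
--         mid = (lo + hi + 1) // 2
--         if s[:mid] in s[mid:]:
--             lo = mid
--         else:
--             hi = mid - 1
--     return s[:lo]
-- ===== Notes on version B (the rewrite author's own statement) =====
-- stated objective: faster
-- what changed: Replaces A's linear scan over all candidate prefix lengths with a binary search on the length, justified by the fact that 's[:L] occurs in s[L:]' is downward-closed in L, so only O(log n) substring-containment tests are needed instead of n/2.
import Mathlib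
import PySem

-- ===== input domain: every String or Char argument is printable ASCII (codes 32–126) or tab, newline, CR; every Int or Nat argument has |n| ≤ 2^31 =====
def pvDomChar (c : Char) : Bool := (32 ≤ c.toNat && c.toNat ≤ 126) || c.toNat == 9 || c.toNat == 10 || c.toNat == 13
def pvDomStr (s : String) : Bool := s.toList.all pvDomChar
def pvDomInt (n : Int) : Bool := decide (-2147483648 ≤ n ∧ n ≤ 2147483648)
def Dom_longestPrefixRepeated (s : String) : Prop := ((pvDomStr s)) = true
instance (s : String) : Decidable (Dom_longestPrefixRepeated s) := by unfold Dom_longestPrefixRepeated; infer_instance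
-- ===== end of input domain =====

-- B replaces A's linear scan over all prefix lengths by a binary search on the
-- length (the containment property is downward-closed), for O(log n) containment tests.

-- ===== PORT A =====
-- the while loop: i counts up while i+1 <= len(s)-(i+1); chosen keeps the last hit
def pvLoopA (cs : List Char) (i : Nat) (chosen : List Char) : List Char :=
  if h : (i : Int) + 1 ≤ (cs.length : Int) - ((i : Int) + 1) then
    pvLoopA cs (i + 1)
      (if PySem.Chars.isIn (PySem.List.slice cs (some 0) (some ((i : Int) + 1)))
            (PySem.List.slice cs (some ((i : Int) + 1)) none)
       then PySem.List.slice cs (some 0) (some ((i : Int) + 1))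
       else chosen)
  else chosen
termination_by cs.length - i
decreasing_by
  have : 2 * i + 2 ≤ cs.length := by omega
  omega

def longestPrefixRepeated (s : String) : String := String.ofList (pvLoopA s.toList 0 [])

-- ===== PORT B =====
-- the containment test 's[:L] in s[L:]'
def pvP (cs : List Char) (L : Nat) : Bool := PySem.Chars.isIn (cs.take L) (cs.drop L)

-- binary search for the largest L in [lo, hi] with pvP cs L (invariant: pvP cs lo)
def pvBS (cs : List Char) (lo hi : Nat) : Nat :=
  if h : lo < hi then
    let mid := (lo + hi + 1) / 2
    if pvP cs mid then pvBS cs mid hi else pvBS cs lo (mid - 1)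
  else lo
termination_by hi - lo
decreasing_by all_goals omega

def longestPrefixRepeated_alt (s : String) : String :=
  String.ofList (s.toList.take (pvBS s.toList 0 (s.toList.length / 2)))

-- ===== PRECONDITION & SPEC =====
def Spec_longestPrefixRepeated (s : String) (out : String) : Prop := out = longestPrefixRepeated_alt s
instance (s : String) (out : String) : Decidable (Spec_longestPrefixRepeated s out) := by unfold Spec_longestPrefixRepeated; infer_instance

-- ===== CLAIM (what is proved, stated in full; the proofs are below) =====
def Claim_equal_longestPrefixRepeated : Prop := ∀ (s : String), Dom_longestPrefixRepeated s → Spec_longestPrefixRepeated s (longestPrefixRepeated s)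

-- ===== LEMMAS AND PROOFS =====

-- the largest L ≤ m with pvP cs L (0 if none; pvP cs 0 is always true)
def pvBest (cs : List Char) : Nat → Nat
  | 0 => 0
  | m + 1 => if pvP cs (m + 1) then m + 1 else pvBest cs m

theorem pvP_zero (cs : List Char) : pvP cs 0 = true := by
  simp [pvP, PySem.Chars.isIn_nil]

-- monotonicity: the containment property is downward-closed in L
theorem pvP_succ_mono (cs : List Char) (L : Nat) (h : pvP cs (L + 1) = true) :
    pvP cs L = true := by
  rw [pvP, PySem.Chars.isIn_iff_infix] at *
  have h1 : cs.take L <+: cs.take (L + 1) := by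
    have := List.take_prefix L (cs.take (L + 1))
    simpa [List.take_take] using this
  have h2 : cs.drop (L + 1) <:+ cs.drop L := by
    have := List.drop_suffix 1 (cs.drop L)
    simpa [List.drop_drop, Nat.add_comm] using this
  exact (h1.isInfix.trans h).trans h2.isInfix

theorem pvP_mono (cs : List Char) {L M : Nat} (hLM : L ≤ M) (h : pvP cs M = true) :
    pvP cs L = true := by
  induction M with
  | zero => simpa [Nat.le_zero.mp hLM] using h
  | succ m ih =>
    rcases Nat.lt_or_ge L (m + 1) with hlt | hge
    · exact ih (by omega) (pvP_succ_mono cs m h)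
    · have : L = m + 1 := by omega
      simpa [this] using h

theorem pvBest_le (cs : List Char) (m : Nat) : pvBest cs m ≤ m := by
  induction m with
  | zero => simp [pvBest]
  | succ k ih => simp only [pvBest]; split <;> omega

theorem pvP_pvBest (cs : List Char) (m : Nat) : pvP cs (pvBest cs m) = true := by
  induction m with
  | zero => simpa [pvBest] using pvP_zero cs
  | succ k ih =>
    simp only [pvBest]; split
    · assumption
    · exact ih

theorem le_pvBest (cs : List Char) {m L : Nat} (hL : L ≤ m) (h : pvP cs L = true) :
    L ≤ pvBest cs m := by
  induction m with
  | zero => omega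
  | succ k ih =>
    simp only [pvBest]; split
    · omega
    · rename_i hnot
      rcases Nat.lt_or_ge L (k + 1) with hlt | hge
      · exact ih (by omega)
      · exact absurd (by simpa [show L = k + 1 by omega] using h) hnot

-- the A-side slices are take / drop
theorem pvSlice_take (cs : List Char) (i : Nat) :
    PySem.List.slice cs (some 0) (some ((i : Int) + 1)) = cs.take (i + 1) := by
  have : ((i : Int) + 1) = ((i + 1 : Nat) : Int) := by push_cast; ring
  rw [this, PySem.List.slice_zero_start, PySem.List.slice_to_natCast]

theorem pvSlice_drop (cs : List Char) (i : Nat) :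
    PySem.List.slice cs (some ((i : Int) + 1)) none = cs.drop (i + 1) := by
  have : ((i : Int) + 1) = ((i + 1 : Nat) : Int) := by push_cast; ring
  rw [this, PySem.List.slice_from_natCast]

-- A's loop computes the take of the best length
theorem pvLoopA_inv (cs : List Char) :
    ∀ k i, cs.length / 2 - i = k → i ≤ cs.length / 2 →
      pvLoopA cs i (cs.take (pvBest cs i)) = cs.take (pvBest cs (cs.length / 2)) := by
  intro k
  induction k with
  | zero =>
    intro i hk hi
    have hie : i = cs.length / 2 := by omega
    rw [pvLoopA]
    have hcond : ¬ ((i : Int) + 1 ≤ (cs.length : Int) - ((i : Int) + 1)) := by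
      have : ¬ (2 * i + 2 ≤ cs.length) := by omega
      omega
    rw [dif_neg hcond, hie]
  | succ k ih =>
    intro i hk hi
    have hlt : i < cs.length / 2 := by omega
    rw [pvLoopA]
    have hcond : (i : Int) + 1 ≤ (cs.length : Int) - ((i : Int) + 1) := by
      have : 2 * i + 2 ≤ cs.length := by omega
      omega
    rw [dif_pos hcond]
    have hstep :
        (if PySem.Chars.isIn (PySem.List.slice cs (some 0) (some ((i : Int) + 1)))
            (PySem.List.slice cs (some ((i : Int) + 1)) none)
         then PySem.List.slice cs (some 0) (some ((i : Int) + 1))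
         else cs.take (pvBest cs i)) = cs.take (pvBest cs (i + 1)) := by
      rw [pvSlice_take, pvSlice_drop]
      show (if pvP cs (i + 1) then cs.take (i + 1) else cs.take (pvBest cs i)) = _
      by_cases hp : pvP cs (i + 1) = true
      · simp [pvBest, hp]
      · simp [pvBest, hp]
    rw [hstep]
    exact ih (i + 1) (by omega) (by omega)

theorem pvLoopA_eq (cs : List Char) :
    pvLoopA cs 0 [] = cs.take (pvBest cs (cs.length / 2)) := by
  have := pvLoopA_inv cs (cs.length / 2) 0 (by omega) (by omega)
  simpa [pvBest] using this

-- at termination (lo = hi) the invariants pin lo to the best length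
theorem pvBS_done (cs : List Char) (lo : Nat) (hlo : lo ≤ cs.length / 2)
    (hplo : pvP cs lo = true)
    (hnone : ∀ L, L ≤ cs.length / 2 → lo < L → pvP cs L = false) :
    lo = pvBest cs (cs.length / 2) := by
  have h1 : lo ≤ pvBest cs (cs.length / 2) := le_pvBest cs hlo hplo
  have h2 : pvBest cs (cs.length / 2) ≤ lo := by
    by_contra hcon
    have hb := pvP_pvBest cs (cs.length / 2)
    have := hnone (pvBest cs (cs.length / 2)) (pvBest_le cs _) (by omega)
    simp [this] at hb
  omega

-- B's binary search finds the best length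
theorem pvBS_inv (cs : List Char) :
    ∀ k lo hi, hi - lo ≤ k → hi ≤ cs.length / 2 → lo ≤ hi → pvP cs lo = true →
      (∀ L, L ≤ cs.length / 2 → hi < L → pvP cs L = false) →
      pvBS cs lo hi = pvBest cs (cs.length / 2) := by
  intro k
  induction k with
  | zero =>
    intro lo hi hk hhi hlohi hplo hnone
    rw [pvBS, dif_neg (by omega)]
    exact pvBS_done cs lo (by omega) hplo (fun L hL hgt => hnone L hL (by omega))
  | succ k ih =>
    intro lo hi hk hhi hlohi hplo hnone
    by_cases hlt : lo < hi
    · rw [pvBS, dif_pos hlt]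
      have hmid1 : lo < (lo + hi + 1) / 2 := by omega
      have hmid2 : (lo + hi + 1) / 2 ≤ hi := by omega
      by_cases hp : pvP cs ((lo + hi + 1) / 2) = true
      · rw [if_pos hp]
        exact ih _ _ (by omega) hhi (by omega) hp hnone
      · rw [if_neg hp]
        refine ih _ _ (by omega) (by omega) (by omega) hplo ?_
        intro L hL hgt
        by_cases hcase : hi < L
        · exact hnone L hL hcase
        · by_contra hcon
          have hPL : pvP cs L = true := by
            cases hPL : pvP cs L
            · exact absurd hPL hcon
            · rfl
          exact hp (pvP_mono cs (by omega) hPL)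
    · rw [pvBS, dif_neg hlt]
      exact pvBS_done cs lo (by omega) hplo
        (fun L hL hgt => hnone L hL (by omega))

theorem pvBS_eq (cs : List Char) :
    pvBS cs 0 (cs.length / 2) = pvBest cs (cs.length / 2) := by
  refine pvBS_inv cs (cs.length / 2) 0 (cs.length / 2) (by omega) (le_refl _) (by omega)
    (pvP_zero cs) ?_
  intro L hL hgt
  omega

-- ===== VERDICT (by name: the statement is the Claim_ definition above) =====
theorem longestPrefixRepeated_spec : Claim_equal_longestPrefixRepeated := by
  intro s _
  unfold Spec_longestPrefixRepeated longestPrefixRepeated longestPrefixRepeated_alt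
  rw [pvLoopA_eq, pvBS_eq]
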